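-- pv_equiv track=rewrite | github.com/deamen/ansible_collections | helper_scripts/fix_ansible_collection_lint.py | parse_github_remote_url
-- ===== SOURCE A (Python) =====
-- def parse_github_remote_url(url: str):
--     """Parse a git remote URL and return a dict with owner, repo and canonical https url.
--
--     Returns None when the url does not look like a GitHub remote.
--     """
--     if not url:
--         return None
--     u = url.strip()
--     if u.endswith(".git"):
--         u = u[:-4]
--
--     path = None
--     if u.startswith("git@github.com:"):
--         path = u[len("git@github.com:") :]
--     else:
--         for prefix in (
--             "ssh://git@github.com/",
--             "https://github.com/",
--             "http://github.com/",
--             "git://github.com/",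
--         ):
--             if u.startswith(prefix):
--                 path = u[len(prefix) :]
--                 break
--         if path is None:
--             idx = u.find("github.com/")
--             if idx != -1:
--                 path = u[idx + len("github.com/") :]
--
--     if not path:
--         return None
--     parts = path.split("/")
--     if len(parts) < 2:
--         return None
--     owner, repo = parts[0], parts[1]
--     canonical = f"https://github.com/{owner}/{repo}"
--     return {"owner": owner, "repo": repo, "url": canonical}
-- ===== SOURCE B (Python) =====
-- def parse_github_remote_url(url: str):
--     """Parse a git remote URL and return a dict with owner, repo and canonical https url.
--
--     Returns None when the url does not look like a GitHub remote.
--     """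
--     if not url:
--         return None
--     u = url.strip()
--     if u.endswith(".git"):
--         u = u[:-4]
--
--     if u.startswith("git@github.com:"):
--         path = u[len("git@github.com:"):]
--     else:
--         # every supported remote form carries the host followed by a slash;
--         # the first occurrence of "github.com/" marks the start of the path
--         _, sep, path = u.partition("github.com/")
--         if not sep:
--             return None
--
--     if not path:
--         return None
--     owner, sep2, rest = path.partition("/")
--     if not sep2:
--         return None
--     repo, _, _ = rest.partition("/")
--     canonical = "https://github.com/" + owner + "/" + repo
--     return {"owner": owner, "repo": repo, "url": canonical}
-- ===== Notes on version B (the rewrite author's own statement) =====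
-- stated objective: simpler
-- what changed: B replaces A's four-prefix startswith loop plus find fallback by a single str.partition at the first occurrence of the github.com host-slash marker (correct because that first occurrence coincides with the end of every supported prefix), and replaces the full slash split plus length guard and indexing by two partitions.
import Mathlib
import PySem

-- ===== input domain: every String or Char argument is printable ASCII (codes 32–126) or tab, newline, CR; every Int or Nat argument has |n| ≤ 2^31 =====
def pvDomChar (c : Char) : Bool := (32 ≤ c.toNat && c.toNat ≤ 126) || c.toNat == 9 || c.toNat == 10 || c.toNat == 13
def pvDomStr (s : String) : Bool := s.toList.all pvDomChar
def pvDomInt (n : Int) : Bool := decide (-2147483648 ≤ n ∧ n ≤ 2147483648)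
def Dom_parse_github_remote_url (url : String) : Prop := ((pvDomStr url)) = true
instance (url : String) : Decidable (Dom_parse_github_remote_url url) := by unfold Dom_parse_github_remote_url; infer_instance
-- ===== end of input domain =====

-- B replaces A's four-prefix startswith loop + find fallback by one str.partition at the
-- github.com host marker and the full slash split + indexing by two partitions — simpler,
-- same results (proved below).

-- ===== PORT A =====

/-- the tuple of fallback prefixes A iterates over -/
def pvPrefixesA : List (List Char) :=
  ["ssh://git@github.com/".toList, "https://github.com/".toList,
   "http://github.com/".toList, "git://github.com/".toList]

/-- A's path computation: the colon form, then the prefix loop (a fold with an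
Option accumulator modelling `break`), then the `find` fallback.
`u[k:]` for nonnegative `k` is `PySem.List.slice u (some k) none` (exact). -/
def pvPathA (u : List Char) : Option (List Char) :=
  if PySem.Chars.startswith u "git@github.com:".toList then
    some (PySem.List.slice u (some 15) none)
  else
    match pvPrefixesA.foldl
      (fun acc p =>
        match acc with
        | some _ => acc
        | none =>
          if PySem.Chars.startswith u p then
            some (PySem.List.slice u (some (p.length : Int)) none)
          else none) none with
    | some q => some q
    | none =>
      let idx := PySem.Chars.find u "github.com/".toList
      if idx ≠ -1 then some (PySem.List.slice u (some (idx + 11)) none) else none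

/-- Port of A.  The f-string builds the same characters as list concatenation. -/
def parse_github_remote_url (url : String) : Option (List (String × String)) :=
  if url = "" then none
  else
    let u0 := PySem.Chars.strip url.toList
    let u := if PySem.Chars.endswith u0 ".git".toList then PySem.List.slice u0 none (some (-4)) else u0
    match pvPathA u with
    | none => none
    | some [] => none        -- `if not path`
    | some path =>
      match PySem.Chars.splitOn path "/".toList with
      | owner :: repo :: _ =>   -- `len(parts) >= 2`; owner, repo = parts[0], parts[1]
        some [("owner", String.ofList owner), ("repo", String.ofList repo),
              ("url", String.ofList ("https://github.com/".toList ++ owner ++ '/' :: repo))]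
      | _ => none              -- `len(parts) < 2`

-- ===== PORT B =====

/-- exact port of Python's `s.partition(sep)` (sep nonempty in our uses):
split at the FIRST occurrence of `sep`; `(s, '', '')` when absent. -/
def pvPartition (s sep : List Char) : List Char × List Char × List Char :=
  if PySem.Chars.find s sep = -1 then (s, [], [])
  else (s.take (PySem.Chars.find s sep).toNat, sep,
        s.drop ((PySem.Chars.find s sep).toNat + sep.length))

/-- B's path computation: the colon form, else one partition on "github.com/". -/
def pvPathB (u : List Char) : Option (List Char) :=
  if PySem.Chars.startswith u "git@github.com:".toList then
    some (PySem.List.slice u (some 15) none)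
  else
    -- `_, sep, path = u.partition("github.com/"); if not sep: return None`
    if (pvPartition u "github.com/".toList).2.1 = [] then none
    else some (pvPartition u "github.com/".toList).2.2

/-- Port of B (from Source B). -/
def parse_github_remote_url_alt (url : String) : Option (List (String × String)) :=
  if url = "" then none
  else
    let u0 := PySem.Chars.strip url.toList
    let u := if PySem.Chars.endswith u0 ".git".toList then PySem.List.slice u0 none (some (-4)) else u0
    match pvPathB u with
    | none => none
    | some path =>
      if path = [] then none        -- `if not path`
      else
      let t := pvPartition path "/".toList
      if t.2.1 = [] then none   -- `if not sep2`
      else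
        some [("owner", String.ofList t.1),
              ("repo", String.ofList (pvPartition t.2.2 "/".toList).1),
              ("url", String.ofList ("https://github.com/".toList ++ t.1 ++ '/' :: (pvPartition t.2.2 "/".toList).1))]

-- ===== PRECONDITION & SPEC =====
def Spec_parse_github_remote_url (url : String) (out : Option (List (String × String))) : Prop := out = parse_github_remote_url_alt url
instance (url : String) (out : Option (List (String × String))) : Decidable (Spec_parse_github_remote_url url out) := by unfold Spec_parse_github_remote_url; infer_instance

-- ===== CLAIM (what is proved, stated in full; the proofs are below) =====
def Claim_equal_parse_github_remote_url : Prop := ∀ (url : String), Dom_parse_github_remote_url url → Spec_parse_github_remote_url url (parse_github_remote_url url)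

-- ===== LEMMAS AND PROOFS =====

/-- `find` is characterised by "occurrence at `k`, none before". -/
lemma pv_find_eq (u sub : List Char) (k : ℕ) (h1 : sub <+: u.drop k)
    (h2 : ∀ i < k, ¬ sub <+: u.drop i) : PySem.Chars.find u sub = (k : ℤ) := by
  have hin : PySem.Chars.isIn sub u = true :=
    (PySem.Chars.exists_prefix_drop_iff_isIn sub u).mp ⟨k, h1⟩
  have hnn : 0 ≤ PySem.Chars.find u sub :=
    (PySem.Chars.find_nonneg_iff u sub).mpr ((PySem.Chars.isIn_iff_infix sub u).mp hin)
  obtain ⟨hf1, hf2⟩ := PySem.Chars.find_spec hnn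
  have hk : (PySem.Chars.find u sub).toNat = k := by
    rcases lt_trichotomy (PySem.Chars.find u sub).toNat k with h | h | h
    · exact absurd hf1 (h2 _ h)
    · exact h
    · exact absurd h1 (hf2 _ h)
  omega

/-- When `u` starts with a concrete prefix whose only occurrence of `sub` is at its
end (position `k`), the first occurrence of `sub` in `u` is at `k`. -/
lemma pv_find_of_prefix (u pp v sub : List Char) (k : ℕ) (hu : pp ++ v = u)
    (hk : pp.drop k = sub) (hlen : pp.length = k + sub.length)
    (hno : ∀ i < k, ¬ sub <+: pp.drop i) : PySem.Chars.find u sub = (k : ℤ) := by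
  subst hu
  apply pv_find_eq
  · rw [List.drop_append_of_le_length (by omega), hk]
    exact List.prefix_append sub v
  · intro i hi hpre
    rw [List.drop_append_of_le_length (by omega)] at hpre
    have hlsub : sub.length ≤ (pp.drop i).length := by
      rw [List.length_drop]; omega
    have heq : sub = (pp.drop i).take sub.length := by
      have := List.prefix_iff_eq_take.mp hpre
      rwa [List.take_append_of_le_length hlsub] at this
    exact hno i hi (heq ▸ List.take_prefix sub.length (pp.drop i))

lemma pv_slice_drop (u : List Char) (n : ℕ) :
    PySem.List.slice u (some (n : ℤ)) none = u.drop n := by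
  rw [PySem.List.slice_from u (Int.natCast_nonneg n)]
  simp

lemma pv_partition_found (s sep : List Char) (k : ℕ) (hsep : sep ≠ [])
    (hf : PySem.Chars.find s sep = (k : ℤ)) :
    (if (pvPartition s sep).2.1 = [] then none else some (pvPartition s sep).2.2)
      = some (s.drop (k + sep.length)) := by
  have hpart : pvPartition s sep = (s.take k, sep, s.drop (k + sep.length)) := by
    unfold pvPartition
    rw [hf, if_neg (show ¬((k : ℤ) = -1) by omega)]
    simp
  rw [hpart]
  simp [hsep]

lemma pv_partition_notfound (s sep : List Char) (hf : PySem.Chars.find s sep = -1) :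
    (if (pvPartition s sep).2.1 = [] then none else some (pvPartition s sep).2.2)
      = (none : Option (List Char)) := by
  have hpart : pvPartition s sep = (s, [], []) := by
    unfold pvPartition
    rw [if_pos hf]
  rw [hpart]
  simp

/-- one matched prefix: B's partition yields exactly A's stripped suffix. -/
lemma pv_prefix_case (u pp v : List Char) (k : ℕ) (hv : pp ++ v = u)
    (hk : pp.drop k = "github.com/".toList)
    (hlen : pp.length = k + "github.com/".toList.length)
    (hno : ∀ i < k, ¬ "github.com/".toList <+: pp.drop i) :
    (if (pvPartition u "github.com/".toList).2.1 = [] then none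
     else some (pvPartition u "github.com/".toList).2.2)
      = some (PySem.List.slice u (some ((pp.length : ℕ) : ℤ)) none) := by
  have hf := pv_find_of_prefix u pp v "github.com/".toList k hv hk hlen hno
  rw [pv_partition_found u "github.com/".toList k (by decide) hf, pv_slice_drop, hlen]

/-- A's prefix loop plus `find` fallback equals B's single partition. -/
lemma pv_path_eq (u : List Char) : pvPathA u = pvPathB u := by
  unfold pvPathA pvPathB
  by_cases hc : PySem.Chars.startswith u "git@github.com:".toList = true
  · rw [if_pos hc, if_pos hc]
  · rw [if_neg hc, if_neg hc]
    simp only [pvPrefixesA, List.foldl_cons, List.foldl_nil]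
    by_cases h1 : PySem.Chars.startswith u "ssh://git@github.com/".toList = true
    · obtain ⟨v, hv⟩ := (PySem.Chars.startswith_iff u _).mp h1
      rw [if_pos h1,
        pv_prefix_case u "ssh://git@github.com/".toList v 10 hv (by decide) (by decide) (by decide)]
    · rw [if_neg h1]
      by_cases h2 : PySem.Chars.startswith u "https://github.com/".toList = true
      · obtain ⟨v, hv⟩ := (PySem.Chars.startswith_iff u _).mp h2
        rw [if_pos h2,
          pv_prefix_case u "https://github.com/".toList v 8 hv (by decide) (by decide) (by decide)]
      · rw [if_neg h2]
        by_cases h3 : PySem.Chars.startswith u "http://github.com/".toList = true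
        · obtain ⟨v, hv⟩ := (PySem.Chars.startswith_iff u _).mp h3
          rw [if_pos h3,
            pv_prefix_case u "http://github.com/".toList v 7 hv (by decide) (by decide) (by decide)]
        · rw [if_neg h3]
          by_cases h4 : PySem.Chars.startswith u "git://github.com/".toList = true
          · obtain ⟨v, hv⟩ := (PySem.Chars.startswith_iff u _).mp h4
            rw [if_pos h4,
              pv_prefix_case u "git://github.com/".toList v 6 hv (by decide) (by decide) (by decide)]
          · rw [if_neg h4]
            by_cases hf : PySem.Chars.find u "github.com/".toList = -1
            · rw [if_neg (not_not_intro hf), pv_partition_notfound u "github.com/".toList hf]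
            · have h0 : 0 ≤ PySem.Chars.find u "github.com/".toList := by
                have := PySem.Chars.neg_one_le_find u "github.com/".toList
                omega
              have hfk : PySem.Chars.find u "github.com/".toList
                  = (((PySem.Chars.find u "github.com/".toList).toNat : ℕ) : ℤ) := by omega
              have hcast : ((PySem.Chars.find u "github.com/".toList).toNat : ℤ) + 11
                  = (((PySem.Chars.find u "github.com/".toList).toNat + 11 : ℕ) : ℤ) := by omega
              have hL : "github.com/".toList.length = 11 := rfl
              rw [if_pos hf,
                pv_partition_found u "github.com/".toList
                  (PySem.Chars.find u "github.com/".toList).toNat (by decide) hfk,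
                hL]
              conv_lhs => rw [hfk]
              rw [hcast, pv_slice_drop]

/-- reference splitter for separator `'/'` (what `splitOn.go` computes). -/
def pvSp : List Char → List (List Char)
  | [] => [[]]
  | c :: rest =>
    if c = '/' then [] :: pvSp rest
    else
      match pvSp rest with
      | r0 :: rs => (c :: r0) :: rs
      | [] => [[c]]

lemma pv_sp_ne_nil (q : List Char) : pvSp q ≠ [] := by
  cases q with
  | nil => simp [pvSp]
  | cons c rest =>
    simp only [pvSp]
    split
    · simp
    · split <;> simp

lemma pv_go_sp (fuel : ℕ) (l cur : List Char) (acc : List (List Char)) (h : l.length < fuel) :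
    PySem.Chars.splitOn.go ['/'] fuel l cur acc
      = acc.reverse ++ List.modifyHead (fun r => cur.reverse ++ r) (pvSp l) := by
  induction fuel generalizing l cur acc with
  | zero => omega
  | succ n ih =>
    cases l with
    | nil => simp [PySem.Chars.splitOn.go, pvSp]
    | cons c rest =>
      have hstep : PySem.Chars.splitOn.go ['/'] (n + 1) (c :: rest) cur acc
          = if (['/'] : List Char).isPrefixOf (c :: rest) then
              PySem.Chars.splitOn.go ['/'] n
                (List.drop (['/'] : List Char).length (c :: rest)) [] (cur.reverse :: acc)
            else PySem.Chars.splitOn.go ['/'] n rest (c :: cur) acc := rfl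
      rw [hstep]
      have hlt : rest.length < n := by simp at h; omega
      rcases hq : pvSp rest with _ | ⟨r0, rs⟩
      · exact absurd hq (pv_sp_ne_nil rest)
      · by_cases hc : c = '/'
        · subst hc
          rw [if_pos (by simp [List.isPrefixOf])]
          have hdrop : List.drop (['/'] : List Char).length ('/' :: rest) = rest := rfl
          rw [hdrop, ih rest [] (cur.reverse :: acc) hlt]
          simp [pvSp, hq]
        · have hb : (['/'] : List Char).isPrefixOf (c :: rest) = false := by
            simp [List.isPrefixOf]
            exact fun e => absurd e.symm hc
          rw [hb]
          rw [if_neg (by simp)]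
          rw [ih rest (c :: cur) acc hlt]
          simp [pvSp, hc, hq, List.append_assoc]

lemma pv_splitOn_eq (p : List Char) : PySem.Chars.splitOn p "/".toList = pvSp p := by
  have hsep : "/".toList = ['/'] := rfl
  unfold PySem.Chars.splitOn
  rw [hsep, pv_go_sp (p.length + 1) p [] [] (by omega)]
  rcases hq : pvSp p with _ | ⟨r0, rs⟩
  · exact absurd hq (pv_sp_ne_nil p)
  · simp

lemma pv_singleton_infix (c : Char) (s : List Char) : [c] <:+: s ↔ c ∈ s := by
  constructor
  · rintro ⟨l, r, rfl⟩; simp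
  · intro h
    obtain ⟨l, r, rfl⟩ := List.append_of_mem h
    exact ⟨l, r, by simp⟩

lemma pv_find_cons_neg (c : Char) (rest : List Char) (hc : c ≠ '/')
    (h : PySem.Chars.find rest ['/'] = -1) : PySem.Chars.find (c :: rest) ['/'] = -1 := by
  rw [PySem.Chars.find_eq_neg_one_iff] at h ⊢
  rw [pv_singleton_infix] at h ⊢
  simp only [List.mem_cons, not_or]
  exact ⟨fun e => hc e.symm, h⟩

lemma pv_find_cons_pos (c : Char) (rest : List Char) (hc : c ≠ '/') (j : ℕ)
    (h : PySem.Chars.find rest ['/'] = (j : ℤ)) :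
    PySem.Chars.find (c :: rest) ['/'] = ((j + 1 : ℕ) : ℤ) := by
  have h0 : 0 ≤ PySem.Chars.find rest ['/'] := by omega
  obtain ⟨hf1, hf2⟩ := PySem.Chars.find_spec h0
  rw [h] at hf1 hf2
  simp only [Int.toNat_natCast] at hf1 hf2
  apply pv_find_eq
  · simpa using hf1
  · intro i hi
    cases i with
    | zero =>
      simp only [List.drop_zero]
      intro hpre
      rw [List.cons_prefix_cons] at hpre
      exact hc hpre.1.symm
    | succ i' =>
      simp only [List.drop_succ_cons]
      exact hf2 i' (by omega)

lemma pv_find_cons_self (rest : List Char) :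
    PySem.Chars.find ('/' :: rest) ['/'] = ((0 : ℕ) : ℤ) := by
  apply pv_find_eq
  · simp [List.cons_prefix_cons]
  · omega

lemma pv_sp_no (p : List Char) (h : PySem.Chars.find p ['/'] = -1) : pvSp p = [p] := by
  induction p with
  | nil => simp [pvSp]
  | cons c rest ih =>
    have hinf := (PySem.Chars.find_eq_neg_one_iff (c :: rest) ['/']).mp h
    rw [pv_singleton_infix] at hinf
    simp only [List.mem_cons, not_or] at hinf
    have hc : c ≠ '/' := fun e => hinf.1 e.symm
    have hrest : PySem.Chars.find rest ['/'] = -1 := by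
      rw [PySem.Chars.find_eq_neg_one_iff, pv_singleton_infix]; exact hinf.2
    simp [pvSp, hc, ih hrest]

lemma pv_sp_found (p : List Char) (i : ℕ) (h : PySem.Chars.find p ['/'] = (i : ℤ)) :
    pvSp p = p.take i :: pvSp (p.drop (i + 1)) := by
  induction p generalizing i with
  | nil =>
    have hnil : PySem.Chars.find ([] : List Char) ['/'] = -1 := by decide
    omega
  | cons c rest ih =>
    by_cases hc : c = '/'
    · subst hc
      have h0 := pv_find_cons_self rest
      have hi : i = 0 := by omega
      subst hi
      simp [pvSp]
    · by_cases hr : PySem.Chars.find rest ['/'] = -1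
      · have := pv_find_cons_neg c rest hc hr
        omega
      · have hr0 : 0 ≤ PySem.Chars.find rest ['/'] := by
          have := PySem.Chars.neg_one_le_find rest ['/']
          omega
        have hrj : PySem.Chars.find rest ['/']
            = (((PySem.Chars.find rest ['/']).toNat : ℕ) : ℤ) := by omega
        have hcp := pv_find_cons_pos c rest hc (PySem.Chars.find rest ['/']).toNat hrj
        have hij : i = (PySem.Chars.find rest ['/']).toNat + 1 := by omega
        subst hij
        simp [pvSp, hc, ih (PySem.Chars.find rest ['/']).toNat hrj]

/-- head of the splitter is the first partition component. -/
lemma pv_sp_head (q : List Char) :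
    ∃ rs, pvSp q = (pvPartition q "/".toList).1 :: rs := by
  have hsep : "/".toList = ['/'] := rfl
  by_cases h : PySem.Chars.find q ['/'] = -1
  · rw [pv_sp_no q h]
    exact ⟨[], by simp [pvPartition, hsep, h]⟩
  · have h0 : 0 ≤ PySem.Chars.find q ['/'] := by
      have := PySem.Chars.neg_one_le_find q ['/']
      omega
    rw [pv_sp_found q (PySem.Chars.find q ['/']).toNat (by omega)]
    exact ⟨pvSp (q.drop ((PySem.Chars.find q ['/']).toNat + 1)),
      by simp [pvPartition, hsep, h]⟩

/-- A's split-based tail equals B's partition-based tail, for every path. -/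
lemma pv_tail_eq (path : List Char) :
    (match PySem.Chars.splitOn path "/".toList with
      | owner :: repo :: _ =>
        some [("owner", String.ofList owner), ("repo", String.ofList repo),
              ("url", String.ofList ("https://github.com/".toList ++ owner ++ '/' :: repo))]
      | _ => (none : Option (List (String × String))))
    = (let t := pvPartition path "/".toList
       if t.2.1 = [] then none
       else
        some [("owner", String.ofList t.1),
              ("repo", String.ofList (pvPartition t.2.2 "/".toList).1),
              ("url", String.ofList ("https://github.com/".toList ++ t.1 ++ '/' :: (pvPartition t.2.2 "/".toList).1))]) := by
  rw [pv_splitOn_eq]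
  have hsep : "/".toList = ['/'] := rfl
  by_cases h : PySem.Chars.find path ['/'] = -1
  · rw [pv_sp_no path h]
    simp [pvPartition, hsep, h]
  · have h0 : 0 ≤ PySem.Chars.find path ['/'] := by
      have := PySem.Chars.neg_one_le_find path ['/']
      omega
    rw [pv_sp_found path (PySem.Chars.find path ['/']).toNat (by omega)]
    obtain ⟨rs, hrs⟩ := pv_sp_head (path.drop ((PySem.Chars.find path ['/']).toNat + 1))
    rw [hrs]
    simp [pvPartition, hsep, h]

-- ===== VERDICT (by name: the statement is the Claim_ definition above) =====
theorem parse_github_remote_url_spec : Claim_equal_parse_github_remote_url := by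
  intro url _
  unfold Spec_parse_github_remote_url parse_github_remote_url parse_github_remote_url_alt
  by_cases h0 : url = ""
  · simp [h0]
  · simp only [h0, if_false, pv_path_eq]
    rcases hp : pvPathB (if PySem.Chars.endswith (PySem.Chars.strip url.toList) ".git".toList = true
        then PySem.List.slice (PySem.Chars.strip url.toList) none (some (-4))
        else PySem.Chars.strip url.toList) with _ | ⟨_ | ⟨c, cs⟩⟩
  
    · rfl
    · rfl
    · exact pv_tail_eq (c :: cs)
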